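-- pv_equiv track=rewrite | github.com/fuba/youtube2slackthread | src/youtube2slack/slack_server.py | _is_video_info_cookie_error
-- ===== SOURCE A (Python) =====
-- def _is_video_info_cookie_error(error_message: str) -> bool:
--     """Check if video info extraction error is due to cookie authentication failure."""
--     cookie_error_patterns = [
--         "Sign in to confirm you're not a bot",
--         "confirm you're not a bot",
--         "This helps protect our community",
--         "Unable to extract initial data",
--         "Requires authentication",
--         "Private video",
--         "Members-only content",
--         "This video is only visible to Premium members",
--         "restricted to paid members",
--         "HTTP Error 403",
--         "Forbidden",
--         "Unable to download video info",
--         "age-restricted",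
--         "requires login",
--         "please sign in",
--         "not available"
--     ]
--
--     for pattern in cookie_error_patterns:
--         if pattern.lower() in error_message.lower():
--             return True
--     return False
-- ===== SOURCE B (Python) =====
-- _COOKIE_ERROR_PATTERNS = [
--     "sign in to confirm you're not a bot",
--     "confirm you're not a bot",
--     "this helps protect our community",
--     "unable to extract initial data",
--     "requires authentication",
--     "private video",
--     "members-only content",
--     "this video is only visible to premium members",
--     "restricted to paid members",
--     "http error 403",
--     "forbidden",
--     "unable to download video info",
--     "age-restricted",
--     "requires login",
--     "please sign in",
--     "not available",
-- ]
--
-- # Dispatch index for the multi-pattern search: first character -> patterns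
-- # starting with that character, built once at import time.
-- _PATTERNS_BY_FIRST_CHAR = {}
-- for _p in _COOKIE_ERROR_PATTERNS:
--     _PATTERNS_BY_FIRST_CHAR.setdefault(_p[0], []).append(_p)
--
--
-- def _is_video_info_cookie_error(error_message: str) -> bool:
--     """Check if video info extraction error is due to cookie authentication failure.
--
--     Single left-to-right sweep over the lowercased message: at each position,
--     only the patterns whose first character matches the current character are
--     tested, via the dispatch table above.
--     """
--     message = error_message.lower()
--     for i, ch in enumerate(message):
--         for pattern in _PATTERNS_BY_FIRST_CHAR.get(ch, []):
--             if message.startswith(pattern, i):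
--                 return True
--     return False
-- ===== Notes on version B (the rewrite author's own statement) =====
-- stated objective: alternative
-- what changed: A's 16 independent case-insensitive substring scans are replaced by a single left-to-right sweep of the once-lowercased message with a first-character dispatch table (dict from first char to the patterns starting with it), so only matching-initial patterns are tested at each position.
import Mathlib
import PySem

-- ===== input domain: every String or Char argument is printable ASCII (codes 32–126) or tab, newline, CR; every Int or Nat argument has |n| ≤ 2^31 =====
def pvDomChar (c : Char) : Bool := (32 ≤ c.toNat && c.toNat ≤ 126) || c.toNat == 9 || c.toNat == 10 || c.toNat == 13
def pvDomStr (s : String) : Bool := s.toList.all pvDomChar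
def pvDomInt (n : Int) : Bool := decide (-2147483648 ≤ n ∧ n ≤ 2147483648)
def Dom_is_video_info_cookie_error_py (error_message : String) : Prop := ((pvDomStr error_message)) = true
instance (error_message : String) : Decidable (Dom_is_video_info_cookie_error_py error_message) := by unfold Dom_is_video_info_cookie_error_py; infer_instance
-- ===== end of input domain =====

-- B replaces A's 16 independent substring scans by one sweep of the once-lowered
-- message with a first-character dispatch table; alternative algorithm, no speed claim.

-- ===== PORT A =====
def pvPatterns : List String := [
  "Sign in to confirm you're not a bot",
  "confirm you're not a bot",
  "This helps protect our community",
  "Unable to extract initial data",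
  "Requires authentication",
  "Private video",
  "Members-only content",
  "This video is only visible to Premium members",
  "restricted to paid members",
  "HTTP Error 403",
  "Forbidden",
  "Unable to download video info",
  "age-restricted",
  "requires login",
  "please sign in",
  "not available"]

def is_video_info_cookie_error_py (error_message : String) : Bool :=
  pvPatterns.any (fun p =>
    PySem.Str.isIn (PySem.Str.lower p) (PySem.Str.lower error_message))

-- ===== PORT B =====
def pvPatternsLower : List String := [
  "sign in to confirm you're not a bot",
  "confirm you're not a bot",
  "this helps protect our community",
  "unable to extract initial data",
  "requires authentication",
  "private video",
  "members-only content",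
  "this video is only visible to premium members",
  "restricted to paid members",
  "http error 403",
  "forbidden",
  "unable to download video info",
  "age-restricted",
  "requires login",
  "please sign in",
  "not available"]

-- _PATTERNS_BY_FIRST_CHAR: d.setdefault(p[0], []).append(p) is d.modify p[0] [] (· ++ [p]);
-- every pattern is nonempty, so p[0] is its head character.
def pvByFirst : PySem.Dict Char (List String) :=
  pvPatternsLower.foldl (fun d p => d.modify p.toList.headI [] (fun l => l ++ [p])) PySem.Dict.empty

-- message.startswith(pattern, i) with 0 ≤ i < len(message) is ported exactly as
-- PySem.Chars.startswith (message.drop i) pattern; enumerate is PySem.List.enumerate.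
def is_video_info_cookie_error_py_alt (error_message : String) : Bool :=
  let message := PySem.Str.lower error_message
  (PySem.List.enumerate message.toList 0).any (fun ic =>
    (PySem.Dict.getD pvByFirst ic.2 []).any (fun p =>
      PySem.Chars.startswith (message.toList.drop ic.1.toNat) p.toList))

-- ===== PRECONDITION & SPEC =====
def Spec_is_video_info_cookie_error_py (error_message : String) (out : Bool) : Prop := out = is_video_info_cookie_error_py_alt error_message
instance (error_message : String) (out : Bool) : Decidable (Spec_is_video_info_cookie_error_py error_message out) := by unfold Spec_is_video_info_cookie_error_py; infer_instance

-- ===== CLAIM =====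
def Claim_equal_is_video_info_cookie_error_py : Prop := ∀ (error_message : String), Dom_is_video_info_cookie_error_py error_message → Spec_is_video_info_cookie_error_py error_message (is_video_info_cookie_error_py error_message)

-- ===== LEMMAS AND PROOFS =====

-- every entry of the dispatch table is a pattern whose head is the key
lemma byFirst_sound : ∀ pr ∈ pvByFirst.items, ∀ p ∈ pr.2,
    p ∈ pvPatternsLower ∧ p.toList.head? = some pr.1 := by decide

-- every pattern is nonempty and listed under its head character
lemma byFirst_complete : ∀ p ∈ pvPatternsLower,
    p.toList ≠ [] ∧ p ∈ PySem.Dict.getD pvByFirst p.toList.headI [] := by decide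

-- lowering A's pattern literals yields exactly B's pre-lowered literals
lemma lowered_patterns :
    pvPatterns.map (fun p => PySem.Chars.lower p.toList) = pvPatternsLower.map String.toList := by
  decide

-- the dispatch sweep finds a pattern iff substring containment does
lemma sweep_eq_isIn (m : List Char) :
    ((PySem.List.enumerate m 0).any (fun ic =>
        (PySem.Dict.getD pvByFirst ic.2 []).any (fun p =>
          PySem.Chars.startswith (m.drop ic.1.toNat) p.toList)))
      = pvPatternsLower.any (fun p => PySem.Chars.isIn p.toList m) := by
  rw [Bool.eq_iff_iff]
  simp only [List.any_eq_true, PySem.Chars.startswith_iff, PySem.List.mem_enumerate_iff]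
  constructor
  · rintro ⟨ic, ⟨k, hk, rfl⟩, p, hp, hpre⟩
    simp only [Int.zero_add, Int.toNat_natCast] at hp hpre
    obtain ⟨vs, hg, hpv⟩ : ∃ vs, pvByFirst.get? m[k] = some vs ∧ p ∈ vs := by
      cases h : pvByFirst.get? m[k] with
      | none => rw [PySem.Dict.getD_of_get?_eq_none _ _ h] at hp; cases hp
      | some vs => exact ⟨vs, rfl, by rwa [PySem.Dict.getD_of_get?_eq_some _ _ h] at hp⟩
    have hmem := byFirst_sound _ (PySem.Dict.mem_items_of_get?_eq_some _ hg) p hpv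
    exact ⟨p, hmem.1, (PySem.Chars.exists_prefix_drop_iff_isIn p.toList m).mp ⟨k, hpre⟩⟩
  · rintro ⟨p, hp, hin⟩
    obtain ⟨hne, hget⟩ := byFirst_complete p hp
    obtain ⟨j, hpre⟩ := (PySem.Chars.exists_prefix_drop_iff_isIn p.toList m).mpr hin
    have hj : j < m.length := by
      by_contra h
      have hd : m.drop j = [] := List.drop_eq_nil_of_le (by omega)
      exact hne (List.prefix_nil.mp (hd ▸ hpre))
    have hdrop : m.drop j = m[j] :: m.drop (j + 1) := (List.getElem_cons_drop hj).symm
    have hhead : p.toList.headI = m[j] := by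
      obtain ⟨t, ht⟩ := hpre
      cases hpl : p.toList with
      | nil => exact absurd hpl hne
      | cons c cs =>
        rw [hpl] at ht
        rw [hdrop] at ht
        simp only [List.cons_append, List.cons.injEq] at ht
        simp [ht.1]
    refine ⟨((j : Int), m[j]), ⟨j, hj, by simp⟩, p, ?_, ?_⟩
    · rw [← hhead]; exact hget
    · simpa using hpre

-- ===== VERDICT =====
theorem is_video_info_cookie_error_py_spec : Claim_equal_is_video_info_cookie_error_py := by
  intro s _
  unfold Spec_is_video_info_cookie_error_py is_video_info_cookie_error_py is_video_info_cookie_error_py_alt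
  show _ = (PySem.List.enumerate (PySem.Str.lower s).toList 0).any (fun ic =>
      (PySem.Dict.getD pvByFirst ic.2 []).any (fun p =>
        PySem.Chars.startswith ((PySem.Str.lower s).toList.drop ic.1.toNat) p.toList))
  rw [sweep_eq_isIn]
  simp only [PySem.Str.isIn_eq, PySem.Str.toList_lower]
  calc pvPatterns.any (fun p => PySem.Chars.isIn (PySem.Chars.lower p.toList) (PySem.Chars.lower s.toList))
      = (pvPatterns.map (fun p => PySem.Chars.lower p.toList)).any
          (fun l => PySem.Chars.isIn l (PySem.Chars.lower s.toList)) := by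
        rw [List.any_map]; rfl
    _ = (pvPatternsLower.map String.toList).any
          (fun l => PySem.Chars.isIn l (PySem.Chars.lower s.toList)) := by rw [lowered_patterns]
    _ = pvPatternsLower.any (fun p => PySem.Chars.isIn p.toList (PySem.Chars.lower s.toList)) := by
        rw [List.any_map]; rfl
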